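-- pv_equiv track=rewrite | github.com/wittn-git/PPSN2024-EDO-scheduling | visualization.py | directly_follows_measure
-- ===== SOURCE A (Python) =====
-- def directly_follows_measure(X, Y):
--     score = 0
--     for x in X:
--         for y in Y:
--             for i in range(len(x)-1):
--                 for j in range(len(y)-1):
--                     if x[i] == y[j] and x[i+1] == y[j+1]:
--                         score += 1
--     return score
-- ===== SOURCE B (Python) =====
-- def directly_follows_measure(X, Y):
--     counts = {}
--     for y in Y:
--         for j in range(len(y) - 1):
--             k = (y[j], y[j + 1])
--             counts[k] = counts.get(k, 0) + 1
--     score = 0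
--     for x in X:
--         for i in range(len(x) - 1):
--             score += counts.get((x[i], x[i + 1]), 0)
--     return score
-- ===== Notes on version B (the rewrite author's own statement) =====
-- stated objective: faster
-- what changed: Instead of comparing every bigram position of every x against every bigram position of every y (four nested loops), B builds a hash-map counter of Y's bigrams once and sums one lookup per bigram of X.
import Mathlib
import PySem

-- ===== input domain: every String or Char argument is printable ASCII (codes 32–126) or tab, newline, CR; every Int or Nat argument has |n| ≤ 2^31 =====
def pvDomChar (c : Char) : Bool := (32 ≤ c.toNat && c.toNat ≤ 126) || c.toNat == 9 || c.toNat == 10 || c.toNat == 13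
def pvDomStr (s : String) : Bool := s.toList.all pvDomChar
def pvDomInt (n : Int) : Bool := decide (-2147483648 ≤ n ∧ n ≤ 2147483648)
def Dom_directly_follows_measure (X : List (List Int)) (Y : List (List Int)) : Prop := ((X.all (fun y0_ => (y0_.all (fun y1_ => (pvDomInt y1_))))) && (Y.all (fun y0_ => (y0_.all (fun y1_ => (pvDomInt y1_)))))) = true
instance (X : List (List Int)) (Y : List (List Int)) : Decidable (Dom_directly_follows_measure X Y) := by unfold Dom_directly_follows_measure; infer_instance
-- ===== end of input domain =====

-- B replaces A's four nested loops by a hash-map counter of Y's bigrams built once,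
-- then one lookup per bigram of X (objective: faster, asymptotically).

-- ===== PORT A =====
def directly_follows_measure (X : List (List Int)) (Y : List (List Int)) : Int :=
  X.foldl (fun score x =>
    Y.foldl (fun score y =>
      (PySem.List.pyRange 0 ((x.length : Int) - 1) 1).foldl (fun score i =>
        (PySem.List.pyRange 0 ((y.length : Int) - 1) 1).foldl (fun score j =>
          if PySem.List.pyGetD x i 0 = PySem.List.pyGetD y j 0 ∧
             PySem.List.pyGetD x (i + 1) 0 = PySem.List.pyGetD y (j + 1) 0
          then score + 1 else score) score) score) score) 0

-- ===== PORT B =====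
def directly_follows_measure_alt (X : List (List Int)) (Y : List (List Int)) : Int :=
  let counts : PySem.Dict (Int × Int) Int :=
    Y.foldl (fun d y =>
      (PySem.List.pyRange 0 ((y.length : Int) - 1) 1).foldl (fun d j =>
        let k := (PySem.List.pyGetD y j 0, PySem.List.pyGetD y (j + 1) 0)
        d.insert k (d.getD k 0 + 1)) d) PySem.Dict.empty
  X.foldl (fun score x =>
    (PySem.List.pyRange 0 ((x.length : Int) - 1) 1).foldl (fun score i =>
      score + counts.getD (PySem.List.pyGetD x i 0, PySem.List.pyGetD x (i + 1) 0) 0) score) 0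

-- ===== PRECONDITION & SPEC =====
def Spec_directly_follows_measure (X : List (List Int)) (Y : List (List Int)) (out : Int) : Prop := out = directly_follows_measure_alt X Y
instance (X : List (List Int)) (Y : List (List Int)) (out : Int) : Decidable (Spec_directly_follows_measure X Y out) := by unfold Spec_directly_follows_measure; infer_instance

-- ===== CLAIM (what is proved, stated in full; the proofs are below) =====
def Claim_equal_directly_follows_measure : Prop := ∀ (X : List (List Int)) (Y : List (List Int)), Dom_directly_follows_measure X Y → Spec_directly_follows_measure X Y (directly_follows_measure X Y)

-- ===== LEMMAS AND PROOFS =====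

-- bigrams of a list
def bigrams (x : List Int) : List (Int × Int) := x.zip x.tail

-- the bigram-index loop body enumerates exactly the adjacent pairs of x
theorem range_map_bigrams (x : List Int) :
    (PySem.List.pyRange 0 ((x.length : Int) - 1) 1).map
      (fun i => (PySem.List.pyGetD x i 0, PySem.List.pyGetD x (i + 1) 0)) = bigrams x := by
  apply List.ext_getElem
  · simp [bigrams, PySem.List.length_pyRange_one, List.length_zip, List.length_tail]
  · intro k h1 h2
    have hk : k < x.length - 1 := by
      simpa [PySem.List.length_pyRange_one] using h1
    simp only [List.getElem_map, PySem.List.getElem_pyRange_one, zero_add]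
    have h1' : PySem.List.pyGetD x ((k : Int)) 0 = x[k] := by
      rw [PySem.List.pyGetD_natCast]
      exact List.getD_eq_getElem x 0 (by omega)
    have h2' : PySem.List.pyGetD x ((k : Int) + 1) 0 = x[k + 1] := by
      have : ((k : Int) + 1) = ((k + 1 : Nat) : Int) := by push_cast; ring
      rw [this, PySem.List.pyGetD_natCast]
      exact List.getD_eq_getElem x 0 (by omega)
    simp [bigrams, h1', h2', List.getElem_zip, List.getElem_tail]

-- counting fold with a pair-equality test is List.count
theorem foldl_ite_pair_count (p : Int × Int) (l : List (Int × Int)) (s : Int) :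
    l.foldl (fun s q => if p.1 = q.1 ∧ p.2 = q.2 then s + 1 else s) s = s + (l.count p : Int) := by
  have : (fun (s : Int) (q : Int × Int) => if p.1 = q.1 ∧ p.2 = q.2 then s + 1 else s)
       = (fun (s : Int) (q : Int × Int) => if (q == p) = true then s + 1 else s) := by
    funext s q
    by_cases h : p = q
    · simp [h]
    · have h' : ¬ (p.1 = q.1 ∧ p.2 = q.2) := by
        intro hc; exact h (Prod.ext hc.1 hc.2)
      have h'' : ¬ (q == p) = true := by
        simp [beq_iff_eq]; intro hq; exact absurd hq.symm h
      simp [h', h'']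
  rw [this]
  simpa [List.count] using PySem.List.foldl_count_if (fun q => q == p) l s

-- A's innermost j-loop counts occurrences of x's i-th bigram among y's bigrams
theorem A_loop_j (x y : List Int) (i : Int) (s : Int) :
    (PySem.List.pyRange 0 ((y.length : Int) - 1) 1).foldl (fun score j =>
        if PySem.List.pyGetD x i 0 = PySem.List.pyGetD y j 0 ∧
           PySem.List.pyGetD x (i + 1) 0 = PySem.List.pyGetD y (j + 1) 0
        then score + 1 else score) s
    = s + ((bigrams y).count (PySem.List.pyGetD x i 0, PySem.List.pyGetD x (i + 1) 0) : Int) := by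
  have h := List.foldl_map
      (f := fun j : Int => (PySem.List.pyGetD y j 0, PySem.List.pyGetD y (j + 1) 0))
      (g := fun (s : Int) (q : Int × Int) =>
        if PySem.List.pyGetD x i 0 = q.1 ∧ PySem.List.pyGetD x (i + 1) 0 = q.2
        then s + 1 else s)
      (l := PySem.List.pyRange 0 ((y.length : Int) - 1) 1) (init := s)
  rw [range_map_bigrams y] at h
  exact h.symm.trans (foldl_ite_pair_count
    (PySem.List.pyGetD x i 0, PySem.List.pyGetD x (i + 1) 0) (bigrams y) s)

-- A's i-loop sums those counts over the bigrams of x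
theorem A_loop_i (x y : List Int) (s : Int) :
    (PySem.List.pyRange 0 ((x.length : Int) - 1) 1).foldl (fun score i =>
        (PySem.List.pyRange 0 ((y.length : Int) - 1) 1).foldl (fun score j =>
          if PySem.List.pyGetD x i 0 = PySem.List.pyGetD y j 0 ∧
             PySem.List.pyGetD x (i + 1) 0 = PySem.List.pyGetD y (j + 1) 0
          then score + 1 else score) score) s
    = s + ((bigrams x).map (fun p => ((bigrams y).count p : Int))).sum := by
  rw [PySem.List.foldl_congr_mem _ _
      (fun score i => score + (((bigrams y).count
        (PySem.List.pyGetD x i 0, PySem.List.pyGetD x (i + 1) 0) : Nat) : Int)) s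
      (fun s i _ => A_loop_j x y i s)]
  rw [PySem.List.foldl_add]
  congr 1
  rw [← range_map_bigrams x, List.map_map]
  rfl

-- characterisation of A: triple sum of bigram counts
theorem A_char (X Y : List (List Int)) :
    directly_follows_measure X Y
      = (X.map (fun x => (Y.map (fun y =>
          ((bigrams x).map (fun p => ((bigrams y).count p : Int))).sum)).sum)).sum := by
  unfold directly_follows_measure
  rw [PySem.List.foldl_congr_mem _ _
      (fun score x => score + (Y.map (fun y =>
        ((bigrams x).map (fun p => ((bigrams y).count p : Int))).sum)).sum) 0
      (fun s x _ => by
        rw [PySem.List.foldl_congr_mem _ _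
            (fun score y => score + ((bigrams x).map
              (fun p => ((bigrams y).count p : Int))).sum) s
            (fun s y _ => A_loop_i x y s)]
        rw [PySem.List.foldl_add])]
  rw [PySem.List.foldl_add]
  simp

-- fold over Y of a fold over each bigram list is a fold over the flattened bigram list
theorem foldl_foldl_flatMap {α β γ : Type} (g : α → List β) (f : γ → β → γ) (Y : List α) (d : γ) :
    Y.foldl (fun d y => (g y).foldl f d) d = (Y.flatMap g).foldl f d := by
  induction Y generalizing d with
  | nil => rfl
  | cons y Y ih => simp [List.flatMap_cons, List.foldl_append, ih]

-- B's counter dict holds the bigram counts of all of Y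
theorem counts_eq (Y : List (List Int)) :
    (Y.foldl (fun d y =>
      (PySem.List.pyRange 0 ((y.length : Int) - 1) 1).foldl (fun d j =>
        let k := (PySem.List.pyGetD y j 0, PySem.List.pyGetD y (j + 1) 0)
        d.insert k (d.getD k 0 + 1)) d)
      (PySem.Dict.empty : PySem.Dict (Int × Int) Int))
    = PySem.Dict.counter (Y.flatMap bigrams) := by
  rw [PySem.List.foldl_congr_mem _ _
      (fun d y => (bigrams y).foldl
        (fun (d : PySem.Dict (Int × Int) Int) k => d.insert k (d.getD k 0 + 1)) d)
      PySem.Dict.empty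
      (fun d y _ => by
        have h := List.foldl_map
            (f := fun j : Int => (PySem.List.pyGetD y j 0, PySem.List.pyGetD y (j + 1) 0))
            (g := fun (d : PySem.Dict (Int × Int) Int) k => d.insert k (d.getD k 0 + 1))
            (l := PySem.List.pyRange 0 ((y.length : Int) - 1) 1) (init := d)
        rw [range_map_bigrams y] at h
        exact h.symm)]
  rw [foldl_foldl_flatMap]
  exact PySem.Dict.foldl_insert_getD_add_one_eq_counter _

-- characterisation of B: sum over bigrams of X of the count in all bigrams of Y
theorem B_char (X Y : List (List Int)) :
    directly_follows_measure_alt X Y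
      = (X.map (fun x => ((bigrams x).map (fun p =>
          ((Y.flatMap bigrams).count p : Int))).sum)).sum := by
  show (X.foldl (fun score x =>
      (PySem.List.pyRange 0 ((x.length : Int) - 1) 1).foldl (fun score i =>
        score + (Y.foldl (fun d y =>
          (PySem.List.pyRange 0 ((y.length : Int) - 1) 1).foldl (fun d j =>
            let k := (PySem.List.pyGetD y j 0, PySem.List.pyGetD y (j + 1) 0)
            d.insert k (d.getD k 0 + 1)) d)
          (PySem.Dict.empty : PySem.Dict (Int × Int) Int)).getD
          (PySem.List.pyGetD x i 0, PySem.List.pyGetD x (i + 1) 0) 0) score) 0) = _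
  rw [PySem.List.foldl_congr_mem _ _
      (fun score x => score + ((bigrams x).map (fun p =>
        ((Y.flatMap bigrams).count p : Int))).sum) 0
      (fun s x _ => by
        rw [PySem.List.foldl_congr_mem _ _
            (fun score i => score + (((Y.flatMap bigrams).count
              (PySem.List.pyGetD x i 0, PySem.List.pyGetD x (i + 1) 0) : Nat) : Int)) s
            (fun s i _ => by rw [counts_eq, PySem.Dict.getD_counter])]
        rw [PySem.List.foldl_add]
        congr 1
        rw [← range_map_bigrams x, List.map_map]
        rfl)]
  rw [PySem.List.foldl_add]
  simp

-- swap the order of two nested list sums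
theorem sum_map_swap {α β : Type} (P : List α) (Y : List β) (f : α → β → Int) :
    (Y.map (fun y => (P.map (fun p => f p y)).sum)).sum
      = (P.map (fun p => (Y.map (f p)).sum)).sum := by
  induction P with
  | nil => simp
  | cons p P ih =>
    simp only [List.map_cons, List.sum_cons, ← ih]
    rw [← PySem.List.sum_map_add_int]

-- ===== VERDICT (by name: the statement is the Claim_ definition above) =====
theorem directly_follows_measure_spec : Claim_equal_directly_follows_measure := by
  intro X Y _hDom
  unfold Spec_directly_follows_measure
  rw [A_char, B_char]
  apply congrArg List.sum
  apply List.map_congr_left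
  intro x _
  rw [sum_map_swap]
  apply congrArg List.sum
  apply List.map_congr_left
  intro p _
  rw [List.count_flatMap]
  push_cast
  rw [List.map_map]
  rfl
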